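-- pv_equiv track=rewrite | github.com/leandrotry/NIM | main.py | computador_escolhe_jogada
-- ===== SOURCE A (Python) =====
-- def computador_escolhe_jogada(n, m):  #FUNÇÃO QUE EXECUTA AS JOGADAS DO COMPUTADOR
--     computador_retira = 1
--
--         # N restante == multiplo de (m+1)
--     while computador_retira != m:
--         if (n - computador_retira) % (m + 1) == 0:
--             return computador_retira
--         else:
--             computador_retira += 1
--     return computador_retira
-- ===== SOURCE B (Python) =====
-- def computador_escolhe_jogada(n, m):
--     # O(1) closed form: leave a multiple of m+1; if already a multiple, take the maximum m.
--     r = n % (m + 1)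
--     return r if r != 0 else m
-- ===== Notes on version B (the rewrite author's own statement) =====
-- stated objective: faster
-- what changed: Replaces the linear scan over candidate removals 1..m with the closed-form modulo r = n % (m+1), returning r if nonzero else m.
-- outside the precondition, e.g. on computador_escolhe_jogada(5, 0): A returns 1, B returns 0; on computador_escolhe_jogada(5, -2): A returns 1, B returns -2; on computador_escolhe_jogada(5, -1): A raises ZeroDivisionError, B raises ZeroDivisionError
import Mathlib
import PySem

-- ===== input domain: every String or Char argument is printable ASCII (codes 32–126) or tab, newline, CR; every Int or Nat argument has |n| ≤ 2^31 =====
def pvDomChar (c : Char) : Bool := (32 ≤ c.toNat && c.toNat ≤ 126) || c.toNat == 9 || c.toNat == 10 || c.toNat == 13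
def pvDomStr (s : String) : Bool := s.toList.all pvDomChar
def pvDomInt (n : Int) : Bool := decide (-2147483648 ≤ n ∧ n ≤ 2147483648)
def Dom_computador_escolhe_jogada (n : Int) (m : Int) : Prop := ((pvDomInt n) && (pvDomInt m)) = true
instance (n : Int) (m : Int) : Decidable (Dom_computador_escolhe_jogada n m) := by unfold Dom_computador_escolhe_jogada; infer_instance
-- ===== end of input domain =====

-- B replaces A's linear scan over candidate removals with the O(1) closed form n % (m+1) (else m).

-- ===== PORT A =====
-- while computador_retira != m: … ; fuel (m-1).toNat makes the loop total (on Pre_ it is exactly the loop's trip count)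
def computadorGoA (n m r : Int) : Nat → Int
  | 0 => r
  | fuel + 1 =>
      if PySem.Int.mod (n - r) (m + 1) = 0 then r
      else computadorGoA n m (r + 1) fuel

def computador_escolhe_jogada (n : Int) (m : Int) : Int :=
  computadorGoA n m 1 (m - 1).toNat

-- ===== PORT B =====
def computador_escolhe_jogada_alt (n : Int) (m : Int) : Int :=
  let r := PySem.Int.mod n (m + 1)
  if r ≠ 0 then r else m

-- ===== PRECONDITION & SPEC =====
-- Pre_ restricts to the natural NIM domain m ≥ 1 (maximum removal at least one): at m = -1 A raises
-- ZeroDivisionError, and for the other m ≤ 0 A's returned loop value is a degenerate-domain artefact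
-- (e.g. it returns 1 at m = 0, a removal larger than the allowed maximum) that B does not reproduce.
def Pre_computador_escolhe_jogada (n : Int) (m : Int) : Prop := 1 ≤ m
instance (n : Int) (m : Int) : Decidable (Pre_computador_escolhe_jogada n m) := by unfold Pre_computador_escolhe_jogada; infer_instance

def pvWitness_computador_escolhe_jogada : Int × Int := (7, 3)

def Spec_computador_escolhe_jogada (n : Int) (m : Int) (out : Int) : Prop := out = computador_escolhe_jogada_alt n m
instance (n : Int) (m : Int) (out : Int) : Decidable (Spec_computador_escolhe_jogada n m out) := by unfold Spec_computador_escolhe_jogada; infer_instance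

-- ===== CLAIM (what is proved, stated in full; the proofs are below) =====
def Claim_equal_computador_escolhe_jogada : Prop := ∀ (n : Int) (m : Int), Dom_computador_escolhe_jogada n m → Pre_computador_escolhe_jogada n m → Spec_computador_escolhe_jogada n m (computador_escolhe_jogada n m)

-- ===== LEMMAS AND PROOFS =====

-- Loop characterisation: from r with exactly m - r iterations of fuel, A's loop returns the residue
-- t = n % (m+1) when it lies in [r, m-1], and otherwise falls through to m.
lemma computadorGoA_eq (n m : Int) (hm : 1 ≤ m) :
    ∀ (fuel : Nat) (r : Int), 1 ≤ r → r + fuel = m →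
      computadorGoA n m r fuel =
        (if r ≤ PySem.Int.mod n (m + 1) ∧ PySem.Int.mod n (m + 1) ≤ m - 1
         then PySem.Int.mod n (m + 1) else m) := by
  have hpos : (0:Int) < m + 1 := by omega
  have ht0 : 0 ≤ PySem.Int.mod n (m + 1) := PySem.Int.mod_nonneg n hpos
  have ht1 : PySem.Int.mod n (m + 1) < m + 1 := PySem.Int.mod_lt n hpos
  have hdvd : (m + 1) ∣ (n - PySem.Int.mod n (m + 1)) := by
    refine ⟨PySem.Int.floordiv n (m + 1), ?_⟩
    have := PySem.Int.floordiv_mul_add_mod n (m + 1)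
    ring_nf
    ring_nf at this
    omega
  intro fuel
  induction fuel with
  | zero =>
      intro r hr hrm
      simp only [computadorGoA]
      rw [if_neg (by omega)]
      omega
  | succ fuel ih =>
      intro r hr hrm
      simp only [computadorGoA]
      by_cases hc : PySem.Int.mod (n - r) (m + 1) = 0
      · rw [if_pos hc]
        have hdr : (m + 1) ∣ (n - r) := (PySem.Int.mod_eq_zero_iff_dvd _ _).mp hc
        have hdiff : (m + 1) ∣ (PySem.Int.mod n (m + 1) - r) := by
          have := Int.dvd_sub hdr hdvd
          have h2 : n - r - (n - PySem.Int.mod n (m + 1)) = PySem.Int.mod n (m + 1) - r := by ring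
          rwa [h2] at this
        have heq : PySem.Int.mod n (m + 1) = r := by
          have habs : |PySem.Int.mod n (m + 1) - r| < m + 1 := by
            rw [abs_lt]; omega
          have := Int.eq_zero_of_abs_lt_dvd hdiff habs
          omega
        rw [if_pos (by omega)]
        omega
      · rw [if_neg hc]
        rw [ih (r + 1) (by omega) (by omega)]
        have hne : PySem.Int.mod n (m + 1) ≠ r := by
          intro h
          apply hc
          rw [PySem.Int.mod_eq_zero_iff_dvd]
          have : n - r = n - PySem.Int.mod n (m + 1) := by omega
          rw [this]; exact hdvd
        by_cases h1 : r + 1 ≤ PySem.Int.mod n (m + 1) ∧ PySem.Int.mod n (m + 1) ≤ m - 1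
        · rw [if_pos h1, if_pos (by omega)]
        · rw [if_neg h1, if_neg (by omega)]

-- ===== VERDICT (by name: the statement is the Claim_ definition above) =====
theorem computador_escolhe_jogada_spec : Claim_equal_computador_escolhe_jogada := by
  intro n m _ hm
  unfold Spec_computador_escolhe_jogada computador_escolhe_jogada computador_escolhe_jogada_alt
  have hm' : (1:Int) ≤ m := hm
  rw [computadorGoA_eq n m hm' (m - 1).toNat 1 le_rfl (by omega)]
  have hpos : (0:Int) < m + 1 := by omega
  have ht0 : 0 ≤ PySem.Int.mod n (m + 1) := PySem.Int.mod_nonneg n hpos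
  have ht1 : PySem.Int.mod n (m + 1) < m + 1 := PySem.Int.mod_lt n hpos
  simp only []
  split_ifs <;> omega
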